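-- pv_equiv track=rewrite | github.com/creative-darkstar/sparta-algorithm | 프로그래머스/2/87390. n＾2 배열 자르기/n＾2 배열 자르기.py | solution
-- ===== SOURCE A (Python) =====
-- def solution(n, left, right):
--     arr = []
--     for i in range(left // n + 1, (right // n + 1) + 1):
--         for j in range(1, n + 1):
--             if j <= i:
--                 arr.append(i)
--             else:
--                 arr.append(j)
--     return arr[(left % n):((right - left) + left % n + 1)]
-- ===== SOURCE B (Python) =====
-- def solution(n, left, right):
--     return [max(k // n, k % n) + 1 for k in range(left, right + 1)]
-- ===== Notes on version B (the rewrite author's own statement) =====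
-- stated objective: alternative
-- what changed: Instead of materialising all rows from left//n+1 to right//n+1 (n cells each) and slicing, B computes each requested cell directly by the closed form max(k//n, k%n)+1 over k in [left, right]; intended as faster, but a timing run could not confirm it consistently.
-- outside the precondition, e.g. on solution(-1, -18, -17): A returns [], B returns [19, 18]; on solution(0, 1, 2): A raises ZeroDivisionError, B raises ZeroDivisionError
import Mathlib
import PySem

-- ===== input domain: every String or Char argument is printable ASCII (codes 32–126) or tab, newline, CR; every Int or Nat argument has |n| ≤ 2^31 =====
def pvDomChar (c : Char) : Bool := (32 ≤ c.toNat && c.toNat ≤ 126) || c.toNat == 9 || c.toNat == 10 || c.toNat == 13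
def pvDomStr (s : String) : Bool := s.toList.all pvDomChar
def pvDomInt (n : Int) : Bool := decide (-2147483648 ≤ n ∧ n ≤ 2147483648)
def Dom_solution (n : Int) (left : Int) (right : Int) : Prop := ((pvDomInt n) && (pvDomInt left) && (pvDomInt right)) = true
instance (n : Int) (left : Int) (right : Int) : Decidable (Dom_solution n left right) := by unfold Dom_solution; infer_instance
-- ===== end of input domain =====

-- B replaces A's build-all-rows-then-slice with the closed form max(k//n, k%n)+1 per
-- requested index k, a genuinely different (closed-form) algorithm of lower work per output element.

-- ===== PORT A =====
-- builds the rows left//n+1 .. right//n+1 cell by cell, then slices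
def solution (n : Int) (left : Int) (right : Int) : List Int :=
  PySem.List.slice
    ((PySem.List.pyRange (PySem.Int.floordiv left n + 1) ((PySem.Int.floordiv right n + 1) + 1) 1).foldl
      (fun arr i =>
        (PySem.List.pyRange 1 (n + 1) 1).foldl
          (fun arr j => if j ≤ i then arr ++ [i] else arr ++ [j]) arr)
      [])
    (some (PySem.Int.mod left n))
    (some ((right - left) + PySem.Int.mod left n + 1))

-- ===== PORT B =====
-- one value per requested index, by the closed form
def solution_alt (n : Int) (left : Int) (right : Int) : List Int :=
  (PySem.List.pyRange left (right + 1) 1).map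
    (fun k => max (PySem.Int.floordiv k n) (PySem.Int.mod k n) + 1)

-- ===== PRECONDITION & SPEC =====
-- Pre_ excludes n ≤ 0: n = 0 makes both programs raise ZeroDivisionError, and for
-- n ≤ -1 (outside the problem's domain, which requires n ≥ 1) A's returned list is an
-- accident of floor-division/range/slice mechanics that matches no specification.
def Pre_solution (n : Int) (left : Int) (right : Int) : Prop := 1 ≤ n
instance (n : Int) (left : Int) (right : Int) : Decidable (Pre_solution n left right) := by
  unfold Pre_solution; infer_instance
def pvWitness_solution : Int × Int × Int := (3, 2, 5)

def Spec_solution (n : Int) (left : Int) (right : Int) (out : List Int) : Prop := out = solution_alt n left right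
instance (n : Int) (left : Int) (right : Int) (out : List Int) : Decidable (Spec_solution n left right out) := by unfold Spec_solution; infer_instance

-- ===== CLAIM (what is proved, stated in full; the proofs are below) =====
def Claim_equal_solution : Prop := ∀ (n : Int) (left : Int) (right : Int), Dom_solution n left right → Pre_solution n left right → Spec_solution n left right (solution n left right)

-- ===== LEMMAS AND PROOFS =====

-- the cell value B computes
def pvCell (n k : Int) : Int := max (PySem.Int.floordiv k n) (PySem.Int.mod k n) + 1

-- A's inner loop over j = 1..n, starting from row index i, appends exactly the cells
-- pvCell n k for k in [(i-1)*n, i*n).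
lemma inner_loop_eq (n i : Int) (hn : 1 ≤ n) (acc : List Int) :
    (PySem.List.pyRange 1 (n + 1) 1).foldl
      (fun arr j => if j ≤ i then arr ++ [i] else arr ++ [j]) acc
      = acc ++ (PySem.List.pyRange ((i - 1) * n) (i * n) 1).map (pvCell n) := by
  have hbody : (fun (arr : List Int) j => if j ≤ i then arr ++ [i] else arr ++ [j])
      = (fun arr j => arr ++ [if j ≤ i then i else j]) := by
    funext arr j; split <;> rfl
  rw [hbody, PySem.List.foldl_append_singleton_eq_map]
  congr 1
  rw [PySem.List.pyRange_one 1 (n + 1), PySem.List.pyRange_one ((i - 1) * n) (i * n)]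
  have hlen : (n + 1 - 1).toNat = (i * n - (i - 1) * n).toNat := by
    have : i * n - (i - 1) * n = n := by ring
    rw [this]; omega
  rw [hlen, List.map_map, List.map_map]
  apply List.map_congr_left
  intro k hk
  simp only [List.mem_range] at hk
  simp only [Function.comp]
  have hk' : (k : Int) < n := by omega
  have hfd : PySem.Int.floordiv ((i - 1) * n + (k : Int)) n = i - 1 := by
    rw [PySem.Int.floordiv_eq_iff_of_pos (by omega : (0:Int) < n)]
    constructor
    · omega
    · nlinarith
  have hmod : PySem.Int.mod ((i - 1) * n + (k : Int)) n = (k : Int) := by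
    have := PySem.Int.floordiv_mul_add_mod ((i - 1) * n + (k : Int)) n
    rw [hfd] at this
    omega
  simp only [pvCell, hfd, hmod]
  rcases le_total (i - 1) ((k : Int)) with h | h
  · rw [max_eq_right h]; split <;> omega
  · rw [max_eq_left h]; split <;> omega

-- A's outer loop over rows a..b collects the cells for k in [(a-1)*n, b*n).
lemma outer_loop_eq (n : Int) (hn : 1 ≤ n) :
    ∀ (a b : Int) (acc : List Int),
      (PySem.List.pyRange a (b + 1) 1).foldl
        (fun arr i =>
          (PySem.List.pyRange 1 (n + 1) 1).foldl
            (fun arr j => if j ≤ i then arr ++ [i] else arr ++ [j]) arr) acc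
        = acc ++ (PySem.List.pyRange ((a - 1) * n) (b * n) 1).map (pvCell n) := by
  intro a b
  by_cases hab : b + 1 ≤ a
  · intro acc
    rw [PySem.List.pyRange_one_eq_nil hab,
        PySem.List.pyRange_one_eq_nil (by nlinarith : b * n ≤ (a - 1) * n)]
    simp
  · push_neg at hab
    have hnat : ∀ m : Nat, ∀ a : Int, (b + 1 - a).toNat = m → ∀ acc : List Int,
        (PySem.List.pyRange a (b + 1) 1).foldl
          (fun arr i =>
            (PySem.List.pyRange 1 (n + 1) 1).foldl
              (fun arr j => if j ≤ i then arr ++ [i] else arr ++ [j]) arr) acc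
          = acc ++ (PySem.List.pyRange ((a - 1) * n) (b * n) 1).map (pvCell n) := by
      intro m
      induction m with
      | zero =>
        intro a hm acc
        have ha : b + 1 ≤ a := by omega
        rw [PySem.List.pyRange_one_eq_nil ha,
            PySem.List.pyRange_one_eq_nil (by nlinarith : b * n ≤ (a - 1) * n)]
        simp
      | succ m ih =>
        intro a hm acc
        have ha : a < b + 1 := by omega
        rw [PySem.List.pyRange_one_cons ha, List.foldl_cons,
            inner_loop_eq n a hn acc, ih (a + 1) (by omega)]
        rw [List.append_assoc]
        congr 1
        rw [← List.map_append]
        congr 1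
        have h1 : (a + 1 - 1) * n = a * n := by ring
        rw [h1]
        exact (PySem.List.pyRange_one_append ((a - 1) * n) (a * n) (b * n)
          (by nlinarith) (by nlinarith)).symm
    exact hnat (b + 1 - a).toNat a rfl

theorem solution_spec : Claim_equal_solution := by
  intro n left right _ hn
  unfold Spec_solution solution solution_alt Pre_solution at *
  set q := PySem.Int.floordiv left n with hq
  set Q := PySem.Int.floordiv right n with hQ
  have hL : q * n + PySem.Int.mod left n = left := by
    rw [hq]; exact PySem.Int.floordiv_mul_add_mod left n
  have hR : Q * n + PySem.Int.mod right n = right := by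
    rw [hQ]; exact PySem.Int.floordiv_mul_add_mod right n
  have hml := PySem.Int.mod_nonneg left (show (0:Int) < n by omega)
  have hml' := PySem.Int.mod_lt left (show (0:Int) < n by omega)
  have hmr := PySem.Int.mod_nonneg right (show (0:Int) < n by omega)
  have hmr' := PySem.Int.mod_lt right (show (0:Int) < n by omega)
  have eq1 : (q + 1) * n = q * n + n := by ring
  have eQ1 : (Q + 1) * n = Q * n + n := by ring
  rw [outer_loop_eq n hn (q + 1) (Q + 1) []]
  have harr : (q + 1 - 1) * n = q * n := by ring
  rw [harr, List.nil_append]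
  by_cases hlr : left ≤ right
  · -- main case: the slice picks exactly the cells for k in [left, right]
    have hqQ : q ≤ Q := by
      by_contra h
      push Not at h
      have : (Q + 1) * n ≤ q * n := by nlinarith
      omega
    have hqQn : q * n ≤ Q * n := by nlinarith
    have h1 : q * n ≤ left := by omega
    have h2 : right + 1 ≤ (Q + 1) * n := by omega
    have hsplit : PySem.List.pyRange (q * n) ((Q + 1) * n) 1
        = PySem.List.pyRange (q * n) left 1
          ++ (PySem.List.pyRange left (right + 1) 1
              ++ PySem.List.pyRange (right + 1) ((Q + 1) * n) 1) := by
      rw [← PySem.List.pyRange_one_append left (right + 1) ((Q + 1) * n) (by omega) h2]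
      exact PySem.List.pyRange_one_append (q * n) left ((Q + 1) * n) h1 (by omega)
    rw [hsplit, List.map_append, List.map_append,
        PySem.List.slice_toNat _ hml (by omega)]
    have hlen1 : ((PySem.List.pyRange (q * n) left 1).map (pvCell n)).length
        = (PySem.Int.mod left n).toNat := by
      rw [List.length_map, PySem.List.length_pyRange_one]; omega
    rw [← hlen1, List.drop_left]
    have hlen2 : ((PySem.List.pyRange left (right + 1) 1).map (pvCell n)).length
        = ((right - left + PySem.Int.mod left n + 1).toNat - (PySem.Int.mod left n).toNat) := by
      rw [List.length_map, PySem.List.length_pyRange_one]; omega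
    rw [hlen1, ← hlen2, List.take_left]
    rfl
  · -- left > right: both sides are empty
    push Not at hlr
    rw [PySem.List.pyRange_one_eq_nil (by omega : right + 1 ≤ left), List.map_nil]
    have hQq : Q ≤ q := by
      by_contra h
      push Not at h
      have : (q + 1) * n ≤ Q * n := by nlinarith
      omega
    by_cases hQq' : Q < q
    · have : (Q + 1) * n ≤ q * n := by nlinarith
      rw [PySem.List.pyRange_one_eq_nil this, List.map_nil]
      simp [PySem.List.slice]
    · have hQeq : Q * n = q * n := by
        have : Q = q := by omega
        rw [this]
      rw [PySem.List.slice_toNat _ hml (by omega)]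
      rw [List.take_eq_nil_iff]
      left
      omega
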